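-- pv_equiv track=rewrite | github.com/pedrocpereira/LA2 | treino1.py | repete
-- ===== SOURCE A (Python) =====
-- def repete(palavra,n):
--     if(n == 0):
--         return ''
--
--     iguais = 0
--
--     for i in range(len(palavra)):
--         if palavra[0:i+1] == palavra[-1-i:]:
--             iguais += 1
--         else:
--             break
--
--     lista = list(palavra)
--     if iguais != 0 and iguais != len(lista):
--         del lista[:iguais]
--     elif iguais == len(lista):
--         del lista [:iguais - 1]
--
--     sem_iguais = ''.join(lista)
--     return palavra + (sem_iguais * (n - 1))
-- ===== SOURCE B (Python) =====
-- def repete(palavra, n):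
--     if n == 0:
--         return ''
--     m = len(palavra)
--     if m == 0 or palavra[0] != palavra[-1]:
--         iguais = 0
--     else:
--         c = palavra[0]
--         a = 1
--         while a < m and palavra[a] == c:
--             a += 1
--         b = 1
--         while b < m and palavra[m - 1 - b] == c:
--             b += 1
--         iguais = m if a == m else min(a, b)
--     if iguais == m and m > 0:
--         tail = palavra[m - 1:]
--     else:
--         tail = palavra[iguais:]
--     return palavra + tail * (n - 1)
-- ===== Notes on version B (the rewrite author's own statement) =====
-- stated objective: alternative
-- what changed: A compares the length-(i+1) prefix slice against the length-(i+1) suffix slice for each i until one fails; B computes the same matched length with two character-run scans, using that all prefixes of lengths 1..k equal the corresponding suffixes iff the first k and last k characters all equal the first character; worst case drops from quadratic to linear in the word length, but on typical inputs A's loop breaks early, so no measured speed-up.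
import Mathlib
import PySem

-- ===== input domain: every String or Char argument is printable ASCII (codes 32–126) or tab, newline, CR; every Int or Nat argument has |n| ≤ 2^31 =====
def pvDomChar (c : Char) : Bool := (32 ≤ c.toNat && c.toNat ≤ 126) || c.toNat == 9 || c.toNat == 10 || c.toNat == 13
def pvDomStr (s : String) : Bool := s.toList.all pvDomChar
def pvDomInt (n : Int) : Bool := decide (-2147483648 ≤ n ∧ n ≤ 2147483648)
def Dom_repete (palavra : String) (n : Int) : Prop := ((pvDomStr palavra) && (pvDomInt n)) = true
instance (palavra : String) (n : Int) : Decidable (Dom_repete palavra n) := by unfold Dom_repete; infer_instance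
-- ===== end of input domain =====

-- B replaces A's per-length prefix/suffix-slice comparison loop by two character-run scans
-- (the matched length is min(front run, back run) of the first/last character); same output.

-- shared primitive: Python's 'xs * n'; the empty-list guard only avoids materialising
-- replicate-of-nil for huge n (same value as PySem.List.pyRepeat on every input)
def pyMul (xs : List Char) (n : Int) : List Char :=
  if xs = [] then [] else PySem.List.pyRepeat xs n

-- ===== PORT A =====
-- for i in range(len(palavra)): if palavra[0:i+1] == palavra[-1-i:]: iguais += 1 else: break
def repeteLoop (l : List Char) (i : Nat) : Nat :=
  if _h : i < l.length then
    if PySem.List.slice l (some 0) (some ((i : Int) + 1)) =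
       PySem.List.slice l (some (-1 - (i : Int))) none then
      repeteLoop l (i + 1)
    else i
  else i
termination_by l.length - i

-- lista = list(palavra); the two 'del' branches; ''.join
def repeteTail (l : List Char) (iguais : Nat) : List Char :=
  if iguais ≠ 0 ∧ iguais ≠ l.length then
    PySem.List.slice l (some (iguais : Int)) none            -- del lista[:iguais]
  else if iguais = l.length then
    PySem.List.slice l (some ((iguais : Int) - 1)) none      -- del lista[:iguais-1]
  else l

def repete (palavra : String) (n : Int) : String :=
  if n = 0 then "" else
    String.ofList (palavra.toList ++
      pyMul (repeteTail palavra.toList (repeteLoop palavra.toList 0)) (n - 1))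

-- ===== PORT B =====
-- while a < m and palavra[a] == c: a += 1
def runF (l : List Char) (c : Char) (a : Nat) : Nat :=
  if h : a < l.length then
    if l[a] = c then runF l c (a + 1) else a
  else a
termination_by l.length - a

-- while b < m and palavra[m-1-b] == c: b += 1
def runB (l : List Char) (c : Char) (b : Nat) : Nat :=
  if h : b < l.length then
    if l[l.length - 1 - b]'(by omega) = c then runB l c (b + 1) else b
  else b
termination_by l.length - b

-- iguais = 0 if the string is empty or first/last chars differ, else m if the front run
-- covers the whole string, else min(front run, back run)   (c = palavra[0])
def altCount (l : List Char) : Nat :=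
  if hl : l = [] then 0
  else if l.getLast hl ≠ l.head hl then 0
  else if runF l (l.head hl) 1 = l.length then l.length
  else min (runF l (l.head hl) 1) (runB l (l.head hl) 1)

-- tail = palavra[m-1:] if iguais == m and m > 0 else palavra[iguais:]
def altTail (l : List Char) (iguais : Nat) : List Char :=
  if iguais = l.length ∧ 0 < l.length then l.drop (l.length - 1) else l.drop iguais

def repete_alt (palavra : String) (n : Int) : String :=
  if n = 0 then "" else
    String.ofList (palavra.toList ++
      pyMul (altTail palavra.toList (altCount palavra.toList)) (n - 1))

-- ===== PRECONDITION & SPEC =====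
def Spec_repete (palavra : String) (n : Int) (out : String) : Prop := out = repete_alt palavra n
instance (palavra : String) (n : Int) (out : String) : Decidable (Spec_repete palavra n out) := by unfold Spec_repete; infer_instance

-- ===== CLAIM (what is proved, stated in full; the proofs are below) =====
def Claim_equal_repete : Prop := ∀ (palavra : String) (n : Int), Dom_repete palavra n → Spec_repete palavra n (repete palavra n)

-- ===== LEMMAS AND PROOFS =====

lemma getElem_idx_congr (l : List Char) (i j : Nat) (h : i = j) (hi : i < l.length)
    (hj : j < l.length) : l[i]'hi = l[j]'hj := by subst h; rfl

lemma take_eq_replicate_of_all (l : List Char) (c : Char) (k : Nat) (hk : k ≤ l.length)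
    (H : ∀ j, j < k → l[j]? = some c) : l.take k = List.replicate k c := by
  apply List.ext_getElem
  · simp [hk]
  · intro j h1 h2
    have h2' : j < k := by simpa using h2
    have := H j h2'
    rw [List.getElem?_eq_getElem (by omega)] at this
    simpa [List.getElem_take] using this

lemma drop_eq_replicate_of_all (l : List Char) (c : Char) (k : Nat) (hk : k ≤ l.length)
    (H : ∀ j, j < k → l[l.length - 1 - j]? = some c) :
    l.drop (l.length - k) = List.replicate k c := by
  apply List.ext_getElem
  · simp; omega
  · intro j h1 h2
    have h2' : j < k := by simpa using h2
    have hidx : l.length - 1 - (k - 1 - j) = l.length - k + j := by omega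
    have := H (k - 1 - j) (by omega)
    rw [hidx] at this
    rw [List.getElem?_eq_getElem (by omega)] at this
    simpa [List.getElem_drop] using this

-- A's i-th loop test, with the two slices rewritten to take/drop
lemma slice_pref (l : List Char) (i : Nat) :
    PySem.List.slice l (some 0) (some ((i : Int) + 1)) = l.take (i + 1) := by
  rw [PySem.List.slice_zero_start]
  have : ((i : Int) + 1) = ((i + 1 : Nat) : Int) := by push_cast; ring
  rw [this, PySem.List.slice_to_natCast]

lemma slice_suff (l : List Char) (i : Nat) :
    PySem.List.slice l (some (-1 - (i : Int))) none = l.drop (l.length - (i + 1)) := by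
  have : (-1 - (i : Int)) = -((i + 1 : Nat) : Int) := by push_cast; ring
  rw [this, PySem.List.slice_from_neg_natCast _ _ (by omega)]

-- the main characterisation: if the first K and last K characters are all c (= l[0]),
-- and position K fails on one side, then A's loop counts exactly K
lemma repeteLoop_eq (l : List Char) (c : Char) (K : Nat)
    (hc : l[0]? = some c ∨ l = []) (hK : K ≤ l.length)
    (H1 : ∀ j, j < K → l[j]? = some c)
    (H2 : ∀ j, j < K → l[l.length - 1 - j]? = some c)
    (H3 : K < l.length → l[K]? ≠ some c ∨ l[l.length - 1 - K]? ≠ some c) :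
    ∀ i, i ≤ K → repeteLoop l i = K := by
  intro i hi
  induction hn : K - i generalizing i with
  | zero =>
    have hiK : i = K := by omega
    rw [hiK, repeteLoop]
    split
    · rename_i hKm
      rw [slice_pref, slice_suff]
      have htake : l.take (K + 1) = List.replicate K c ++ [l[K]'hKm] := by
        have h0 : l.take (K + 1) = l.take K ++ [l[K]'hKm] := by
          rw [List.take_add_one]
          simp [List.getElem?_eq_getElem hKm]
        rw [h0, take_eq_replicate_of_all l c K (by omega) H1]
      have hdrop : l.drop (l.length - (K + 1)) =
          l[l.length - 1 - K]'(by omega) :: List.replicate K c := by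
        have h1 : l.drop (l.length - (K + 1)) =
            l[l.length - (K+1)]'(by omega) :: l.drop (l.length - (K+1) + 1) := by
          rw [List.drop_eq_getElem_cons (by omega)]
        have h2 : l.length - (K + 1) + 1 = l.length - K := by omega
        rw [h1, h2, drop_eq_replicate_of_all l c K (by omega) H2]
        congr 1
        exact getElem_idx_congr l _ _ (by omega) _ _
      rw [htake, hdrop]
      split
      · rename_i heq
        -- derive l[K] = c ∧ l[l.length-1-K] = c, contradicting H3
        exfalso
        have hlen0 : 0 < l.length := by omega
        have hc0 : l[0]'hlen0 = c := by
          rcases hc with h | h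
          · rw [List.getElem?_eq_getElem hlen0] at h; simpa using h
          · simp [h] at hlen0
        have hfirst : (List.replicate K c ++ [l[K]'hKm])[0]'(by simp) =
            (l[l.length - 1 - K]'(by omega) :: List.replicate K c)[0] := by
          congr 1
        have hlastc : (List.replicate K c ++ [l[K]'hKm])[K]'(by simp) =
            (l[l.length - 1 - K]'(by omega) :: List.replicate K c)[K]'(by simp) := by
          congr 1
        have hback : l[l.length - 1 - K]'(by omega) = c := by
          rcases Nat.eq_zero_or_pos K with hK0 | hKpos
          · subst hK0
            simpa [hc0] using hfirst.symm
          · have h5 : (List.replicate K c ++ [l[K]'hKm])[0]'(by simp) = c := by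
              rw [List.getElem_append_left (by simpa using hKpos)]
              simp
            rw [h5] at hfirst; exact hfirst.symm
        have hfwd : l[K]'hKm = c := by
          rcases Nat.eq_zero_or_pos K with hK0 | hKpos
          · subst hK0; exact hc0
          · have hml : l[l.length - 1]? = some c := H2 0 hKpos
            rw [List.getElem?_eq_getElem (by omega)] at hml
            have hr : (l[l.length - 1 - K]'(by omega) :: List.replicate K c)[K]'(by simp) = c := by
              rw [List.getElem_cons]
              simp [Nat.pos_iff_ne_zero.mp hKpos]
            have hlft : (List.replicate K c ++ [l[K]'hKm])[K]'(by simp) = l[K]'hKm := by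
              rw [List.getElem_append_right (by simp)]
              simp
            rw [hlft, hr] at hlastc
            exact hlastc
        rcases H3 hKm with h | h
        · exact h (by rw [List.getElem?_eq_getElem hKm, hfwd])
        · exact h (by rw [List.getElem?_eq_getElem (by omega : l.length - 1 - K < l.length), hback])
      · rfl
    · rfl
  | succ n ih =>
    have hiK : i < K := by omega
    rw [repeteLoop]
    have him : i < l.length := by omega
    rw [dif_pos him, slice_pref, slice_suff]
    have ht : l.take (i + 1) = List.replicate (i + 1) c :=
      take_eq_replicate_of_all l c (i+1) (by omega) (fun j hj => H1 j (by omega))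
    have hd : l.drop (l.length - (i + 1)) = List.replicate (i + 1) c :=
      drop_eq_replicate_of_all l c (i+1) (by omega) (fun j hj => H2 j (by omega))
    rw [ht, hd, if_pos rfl]
    exact ih (i + 1) (by omega) (by omega)

-- facts about runF / runB
lemma runF_le (l : List Char) (c : Char) (a : Nat) (h : a ≤ l.length) : runF l c a ≤ l.length := by
  fun_induction runF l c a with
  | case1 a h' heq ih => exact ih (by omega)
  | case2 => omega
  | case3 => omega

lemma runF_mem (l : List Char) (c : Char) (a : Nat) :
    ∀ j, a ≤ j → j < runF l c a → l[j]? = some c := by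
  fun_induction runF l c a with
  | case1 a h' heq ih =>
    intro j hj1 hj2
    rcases Nat.eq_or_lt_of_le hj1 with h | h
    · rw [← h]; rw [List.getElem?_eq_getElem h', heq]
    · exact ih j h hj2
  | case2 a h' heq =>
    intro j hj1 hj2; omega
  | case3 a h' =>
    intro j hj1 hj2
    have := runF_le l c a (by omega)
    omega

lemma runF_stop (l : List Char) (c : Char) (a : Nat) (h : runF l c a < l.length) :
    l[runF l c a]? ≠ some c := by
  fun_induction runF l c a with
  | case1 a h' heq ih => exact ih h
  | case2 a h' heq =>
    rw [List.getElem?_eq_getElem h']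
    simpa using heq
  | case3 a h' =>
    rw [List.getElem?_eq_none_iff.mpr (by omega)]
    simp

lemma runB_le (l : List Char) (c : Char) (b : Nat) (h : b ≤ l.length) : runB l c b ≤ l.length := by
  fun_induction runB l c b with
  | case1 b h' heq ih => exact ih (by omega)
  | case2 => omega
  | case3 => omega

lemma runB_mem (l : List Char) (c : Char) (b : Nat) :
    ∀ j, b ≤ j → j < runB l c b → l[l.length - 1 - j]? = some c := by
  fun_induction runB l c b with
  | case1 b h' heq ih =>
    intro j hj1 hj2
    rcases Nat.eq_or_lt_of_le hj1 with h | h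
    · rw [← h]; rw [List.getElem?_eq_getElem (by omega)]; exact congrArg some heq
    · exact ih j h hj2
  | case2 b h' heq =>
    intro j hj1 hj2; omega
  | case3 b h' =>
    intro j hj1 hj2
    have := runB_le l c b (by omega)
    omega

lemma runB_stop (l : List Char) (c : Char) (b : Nat) (h : runB l c b < l.length) :
    l[l.length - 1 - runB l c b]? ≠ some c := by
  fun_induction runB l c b with
  | case1 b h' heq ih => exact ih h
  | case2 b h' heq =>
    rw [List.getElem?_eq_getElem (by omega)]
    simpa using heq
  | case3 b h' => omega

-- the two counts agree
lemma count_eq (l : List Char) : repeteLoop l 0 = altCount l := by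
  unfold altCount
  split
  · rename_i hl
    subst hl
    rw [repeteLoop]; simp
  · rename_i hl
    have hlen : 0 < l.length := List.length_pos_iff.mpr hl
    have hc : l[0]? = some (l.head hl) := by
      rw [List.getElem?_eq_getElem hlen]
      simp [List.head_eq_getElem]
    set c := l.head hl with hcdef
    split
    · rename_i hlast
      -- palavra[0] ≠ palavra[-1] : count is 0
      have hlast' : l[l.length - 1]? ≠ some c := by
        rw [List.getElem?_eq_getElem (by omega)]
        intro h
        apply hlast
        rw [List.getLast_eq_getElem]
        simpa using h
      exact repeteLoop_eq l c 0 (Or.inl hc) (by omega)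
        (fun j hj => absurd hj (by omega)) (fun j hj => absurd hj (by omega))
        (fun _ => Or.inr (by simpa using hlast')) 0 (le_refl 0)
    · rename_i hlast
      have hlastc : l[l.length - 1]? = some c := by
        rw [List.getElem?_eq_getElem (by omega)]
        simp at hlast
        rw [List.getLast_eq_getElem] at hlast
        exact congrArg some hlast
      have hA1 : ∀ j, j < runF l c 1 → l[j]? = some c := by
        intro j hj
        rcases Nat.eq_zero_or_pos j with h0 | h0
        · rw [h0]; exact hc
        · exact runF_mem l c 1 j h0 hj
      have hB1 : ∀ j, j < runB l c 1 → l[l.length - 1 - j]? = some c := by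
        intro j hj
        rcases Nat.eq_zero_or_pos j with h0 | h0
        · rw [h0]; simpa using hlastc
        · exact runB_mem l c 1 j h0 hj
      split
      · rename_i ham
        -- a = m : whole string is c, count = m
        exact repeteLoop_eq l c l.length (Or.inl hc) (le_refl _)
          (fun j hj => hA1 j (by omega))
          (fun j hj => hA1 (l.length - 1 - j) (by omega))
          (fun h => absurd h (by omega)) 0 (by omega)
      · rename_i ham
        have haleM : runF l c 1 ≤ l.length := runF_le l c 1 hlen
        have hbleM : runB l c 1 ≤ l.length := runB_le l c 1 hlen
        have haM : runF l c 1 < l.length := by omega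
        apply repeteLoop_eq l c (min (runF l c 1) (runB l c 1)) (Or.inl hc) (by omega)
          (fun j hj => hA1 j (by omega))
          (fun j hj => hB1 j (by omega))
          _ 0 (by omega)
        intro hKm
        rcases Nat.le_total (runF l c 1) (runB l c 1) with hab | hab
        · rw [Nat.min_eq_left hab]
          exact Or.inl (runF_stop l c 1 haM)
        · rw [Nat.min_eq_right hab]
          have hbM : runB l c 1 < l.length := by
            rw [Nat.min_eq_right hab] at hKm; exact hKm
          exact Or.inr (runB_stop l c 1 hbM)

lemma altCount_le (l : List Char) : altCount l ≤ l.length := by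
  unfold altCount
  split
  · omega
  · rename_i hl
    split
    · omega
    · split
      · omega
      · have := runF_le l (l.head hl) 1 (List.length_pos_iff.mpr hl)
        omega

-- the selected tails agree once the counts agree
lemma tail_eq (l : List Char) :
    repeteTail l (repeteLoop l 0) = altTail l (altCount l) := by
  rw [count_eq]
  unfold repeteTail altTail
  have hgle : altCount l ≤ l.length := altCount_le l
  split
  · rename_i hcond
    rw [if_neg (by intro h; exact hcond.2 h.1), PySem.List.slice_from_natCast]
  · split
    · rename_i hcond heq
      rcases Nat.eq_zero_or_pos l.length with h0 | h0
      · rw [if_neg (by omega)]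
        have hnil : l = [] := List.length_eq_zero_iff.mp h0
        rw [hnil]
        simp [PySem.List.slice_some_none]
      · rw [if_pos ⟨heq, h0⟩]
        have hcast : ((altCount l : Int) - 1) = ((altCount l - 1 : Nat) : Int) := by omega
        rw [hcast, PySem.List.slice_from_natCast, heq]
    · rename_i hcond hne
      have hg0 : altCount l = 0 := by
        by_cases h : altCount l = 0
        · exact h
        · exact absurd ⟨h, hne⟩ hcond
      rw [if_neg (by omega), hg0]
      simp

-- ===== VERDICT (by name: the statement is the Claim_ definition above) =====
theorem repete_spec : Claim_equal_repete := by
  intro palavra n _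
  unfold Spec_repete repete repete_alt
  rw [tail_eq]
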